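-- pv_equiv track=rewrite | github.com/rsirefelt/advent_of_code | 2021/dec02/jesper_ericsson/main.py | loop_instructions1
-- ===== SOURCE A (Python) =====
-- def loop_instructions1(instructions):
--     length = 0
--     depth = 0
--
--     for instruction in instructions:
--
--         if instruction[0] == 'forward':
--             length += instruction[1]
--         elif instruction[0] == 'down':
--             depth += instruction[1]
--         elif instruction[0] == 'up':
--             depth -= instruction[1]
--
--     return length * depth
-- ===== SOURCE B (Python) =====
-- DIRS = {'forward': (1, 0), 'down': (0, 1), 'up': (0, -1)}
--
--
-- def loop_instructions1(instructions):
--     # group-by: per-tag totals in one dict pass, no branching per instruction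
--     totals = {}
--     for t, v in instructions:
--         totals[t] = totals.get(t, 0) + v
--     # dot product of the per-tag totals with the fixed direction table
--     x = 0
--     y = 0
--     for t, (dx, dy) in DIRS.items():
--         s = totals.get(t, 0)
--         x += dx * s
--         y += dy * s
--     return x * y
-- ===== Notes on version B (the rewrite author's own statement) =====
-- stated objective: alternative
-- what changed: Replaces the branch-dispatching two-accumulator loop with a group-by dict of per-tag totals followed by a dot product with a fixed tag-to-direction-vector table.
import Mathlib
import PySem

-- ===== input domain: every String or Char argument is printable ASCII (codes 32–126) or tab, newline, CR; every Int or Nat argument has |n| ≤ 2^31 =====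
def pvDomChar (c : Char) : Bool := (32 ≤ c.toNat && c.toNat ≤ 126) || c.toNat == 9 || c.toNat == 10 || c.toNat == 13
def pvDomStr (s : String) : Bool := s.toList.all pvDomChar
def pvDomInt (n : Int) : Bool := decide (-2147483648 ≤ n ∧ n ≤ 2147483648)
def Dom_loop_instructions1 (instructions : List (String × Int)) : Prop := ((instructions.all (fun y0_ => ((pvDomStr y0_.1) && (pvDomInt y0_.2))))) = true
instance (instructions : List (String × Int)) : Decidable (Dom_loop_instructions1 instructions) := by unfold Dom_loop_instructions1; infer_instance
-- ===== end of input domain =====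

-- B replaces A's branch-dispatching two-accumulator loop with a group-by dict of per-tag
-- totals followed by a dot product with a fixed direction table (alternative decomposition).


-- ===== PORT A =====
def loop_instructions1 (instructions : List (String × Int)) : Int :=
  let st := instructions.foldl (fun (st : Int × Int) instruction =>
    if instruction.1 == "forward" then (st.1 + instruction.2, st.2)
    else if instruction.1 == "down" then (st.1, st.2 + instruction.2)
    else if instruction.1 == "up" then (st.1, st.2 - instruction.2)
    else st) (0, 0)
  st.1 * st.2

-- ===== PORT B =====
-- B: group-by dict of per-tag totals, then a dot product with the fixed direction table DIRS.
def pvDirs : List (String × Int × Int) := [("forward", (1, 0)), ("down", (0, 1)), ("up", (0, -1))]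

def loop_instructions1_alt (instructions : List (String × Int)) : Int :=
  let totals := instructions.foldl
    (fun (d : PySem.Dict String Int) p => d.insert p.1 (d.getD p.1 0 + p.2)) PySem.Dict.empty
  let xy := pvDirs.foldl (fun (xy : Int × Int) e =>
    let s := totals.getD e.1 0
    (xy.1 + e.2.1 * s, xy.2 + e.2.2 * s)) (0, 0)
  xy.1 * xy.2

-- ===== PRECONDITION & SPEC =====
def Spec_loop_instructions1 (instructions : List (String × Int)) (out : Int) : Prop := out = loop_instructions1_alt instructions
instance (instructions : List (String × Int)) (out : Int) : Decidable (Spec_loop_instructions1 instructions out) := by unfold Spec_loop_instructions1; infer_instance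

-- ===== CLAIM (what is proved, stated in full; the proofs are below) =====
def Claim_equal_loop_instructions1 : Prop := ∀ (instructions : List (String × Int)), Dom_loop_instructions1 instructions → Spec_loop_instructions1 instructions (loop_instructions1 instructions)

-- ===== LEMMAS AND PROOFS =====

-- sum of values carrying tag k
def pvSumTag (k : String) (xs : List (String × Int)) : Int :=
  ((xs.filter (fun p => p.1 == k)).map (·.2)).sum

theorem pvSumTag_nil (k : String) : pvSumTag k [] = 0 := rfl

theorem pvSumTag_cons (k : String) (p : String × Int) (xs : List (String × Int)) :
    pvSumTag k (p :: xs) = (if p.1 = k then p.2 else 0) + pvSumTag k xs := by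
  simp only [pvSumTag, List.filter_cons]
  split_ifs with h <;> simp_all

-- the group-by fold's lookup at k is the per-tag sum
theorem getD_groupby (xs : List (String × Int)) (d : PySem.Dict String Int) (k : String) :
    (xs.foldl (fun (d : PySem.Dict String Int) p => d.insert p.1 (d.getD p.1 0 + p.2)) d).getD k 0
      = d.getD k 0 + pvSumTag k xs := by
  induction xs generalizing d with
  | nil => simp [pvSumTag_nil]
  | cons p tl ih =>
    simp only [List.foldl_cons, ih, pvSumTag_cons, PySem.Dict.getD_insert]
    by_cases h : p.1 = k
    · subst h
      simp
      ring
    · simp [h, Ne.symm h]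

-- A's fold computes the per-tag sums
theorem loopA_key (xs : List (String × Int)) (l d : Int) :
    (xs.foldl (fun (st : Int × Int) instruction =>
      if instruction.1 == "forward" then (st.1 + instruction.2, st.2)
      else if instruction.1 == "down" then (st.1, st.2 + instruction.2)
      else if instruction.1 == "up" then (st.1, st.2 - instruction.2)
      else st) (l, d)) =
    (l + pvSumTag "forward" xs, d + pvSumTag "down" xs - pvSumTag "up" xs) := by
  induction xs generalizing l d with
  | nil => simp [pvSumTag_nil]
  | cons p tl ih =>
    simp only [List.foldl_cons, pvSumTag_cons]
    split_ifs <;> simp_all <;> ring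

-- ===== VERDICT (by name: the statement is the Claim_ definition above) =====
theorem loop_instructions1_spec : Claim_equal_loop_instructions1 := by
  intro xs _
  unfold Spec_loop_instructions1 loop_instructions1 loop_instructions1_alt
  simp only [loopA_key, pvDirs, List.foldl_cons, List.foldl_nil, getD_groupby,
    PySem.Dict.getD_empty]
  ring
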